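-- pv_equiv track=rewrite | github.com/mikmum/conll-2023 | model.py | correct_iob_labels
-- ===== SOURCE A (Python) =====
-- def correct_iob_labels(predictions):
--     corrected = []
--     for pred in predictions:
--         corrected_sentence = []
--         prev_label = 'O'
--         for label in pred:
--             if label.startswith('I-') and (prev_label == 'O' or prev_label[2:] != label[2:]):
--                 corrected_sentence.append('B-' + label[2:])
--             else:
--                 corrected_sentence.append(label)
--             prev_label = corrected_sentence[-1]
--         corrected.append(corrected_sentence)
--     return corrected
-- ===== SOURCE B (Python) =====
-- def correct_iob_labels(predictions):
--     def fix(prev, label):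
--         if label.startswith('I-') and (prev == 'O' or prev[2:] != label[2:]):
--             return 'B-' + label[2:]
--         return label
--     return [[fix(prev, label) for prev, label in zip(['O'] + pred, pred)]
--             for pred in predictions]
-- ===== Notes on version B (the rewrite author's own statement) =====
-- stated objective: simpler
-- what changed: Replaces A's stateful fold that threads the corrected previous label through an accumulator with a stateless positional comprehension over zip(['O']+pred, pred) using the ORIGINAL previous label, proved equivalent because correction preserves the [2:] suffix and never produces 'O'.
import Mathlib
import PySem

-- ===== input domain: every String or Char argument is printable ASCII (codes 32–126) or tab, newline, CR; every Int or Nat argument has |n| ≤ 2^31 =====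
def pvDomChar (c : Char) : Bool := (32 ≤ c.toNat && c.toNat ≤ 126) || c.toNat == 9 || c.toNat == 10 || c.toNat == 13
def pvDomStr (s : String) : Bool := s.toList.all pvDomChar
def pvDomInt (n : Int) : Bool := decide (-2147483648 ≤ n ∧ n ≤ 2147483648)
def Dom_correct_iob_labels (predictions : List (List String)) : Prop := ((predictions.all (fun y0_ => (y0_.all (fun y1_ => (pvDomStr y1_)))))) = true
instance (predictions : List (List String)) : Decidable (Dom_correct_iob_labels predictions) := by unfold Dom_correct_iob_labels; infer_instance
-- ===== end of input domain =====

-- B recomputes each label positionally from the ORIGINAL previous label (a stateless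
-- zip/map), instead of A's fold that threads the corrected previous label; objective: simpler.

-- ===== PORT A =====
def correct_iob_labels (predictions : List (List String)) : List (List String) :=
  predictions.foldl (fun corrected pred =>
    let st := pred.foldl (fun (st : List String × String) label =>
      let out :=
        if PySem.Str.startswith label "I-" &&
           (st.2 == "O" || !(PySem.Str.slice st.2 (some 2) none == PySem.Str.slice label (some 2) none))
        then "B-" ++ PySem.Str.slice label (some 2) none
        else label
      (st.1 ++ [out], out)) (([] : List String), "O")
    corrected ++ [st.1]) []

-- ===== PORT B =====
def fixLabel_alt (prev label : String) : String :=
  if PySem.Str.startswith label "I-" &&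
     (prev == "O" || !(PySem.Str.slice prev (some 2) none == PySem.Str.slice label (some 2) none))
  then "B-" ++ PySem.Str.slice label (some 2) none
  else label

def correct_iob_labels_alt (predictions : List (List String)) : List (List String) :=
  predictions.map (fun pred => List.zipWith fixLabel_alt ("O" :: pred) pred)

-- ===== PRECONDITION & SPEC =====
def Spec_correct_iob_labels (predictions : List (List String)) (out : List (List String)) : Prop := out = correct_iob_labels_alt predictions
instance (predictions : List (List String)) (out : List (List String)) : Decidable (Spec_correct_iob_labels predictions out) := by unfold Spec_correct_iob_labels; infer_instance

-- ===== CLAIM (what is proved, stated in full; the proofs are below) =====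
def Claim_equal_correct_iob_labels : Prop := ∀ (predictions : List (List String)), Dom_correct_iob_labels predictions → Spec_correct_iob_labels predictions (correct_iob_labels predictions)

-- ===== LEMMAS AND PROOFS =====

-- Relation between A's corrected previous label and the original previous label:
-- same "is it 'O'" answer and the same [2:] suffix, so both branch tests agree.
theorem slice2 {α : Type} (xs : List α) : PySem.List.slice xs (some 2) none = xs.drop 2 := by
  have := PySem.List.slice_from (xs := xs) (a := 2) (by norm_num)
  simpa using this

def prevRel (pa po : String) : Prop :=
  (pa = "O" ↔ po = "O") ∧
  PySem.Str.slice pa (some 2) none = PySem.Str.slice po (some 2) none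

theorem prevRel_fix (prev l : String) : prevRel (fixLabel_alt prev l) l := by
  unfold fixLabel_alt prevRel
  split
  · next h =>
    simp only [Bool.and_eq_true] at h
    have hsw := h.1
    rw [PySem.Str.startswith_eq] at hsw
    rw [PySem.Chars.startswith_iff] at hsw
    obtain ⟨rest, hrest⟩ := hsw
    have hl : l.toList = 'I' :: '-' :: rest := by
      simpa using hrest.symm
    constructor
    · constructor
      · intro hc
        exfalso
        have : ("B-" ++ PySem.Str.slice l (some 2) none).toList = "O".toList := by rw [hc]
        simp [String.toList_append] at this
      · intro hc
        exfalso
        have : l.toList = "O".toList := by rw [hc]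
        rw [hl] at this
        simp at this
    · apply String.toList_inj.mp
      simp only [PySem.Str.toList_slice, PySem.Chars.slice_eq_listSlice,
        String.toList_append, slice2]
      rw [hl]
      simp
  · exact ⟨Iff.rfl, rfl⟩

theorem fix_congr (pa po l : String) (h : prevRel pa po) :
    (if PySem.Str.startswith l "I-" &&
        (pa == "O" || !(PySem.Str.slice pa (some 2) none == PySem.Str.slice l (some 2) none))
     then "B-" ++ PySem.Str.slice l (some 2) none else l) = fixLabel_alt po l := by
  unfold fixLabel_alt
  obtain ⟨h1, h2⟩ := h
  have e1 : (pa == "O") = (po == "O") := by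
    by_cases hp : pa = "O"
    · simp [hp, h1.mp hp]
    · have : ¬ po = "O" := fun hc => hp (h1.mpr hc)
      simp [hp, this]
  rw [e1, h2]

-- A's inner loop, with any accumulator and any prev related to the original prev,
-- produces the zipWith of B.
theorem inner_eq (pred : List String) (acc : List String) (pa po : String)
    (h : prevRel pa po) :
    (pred.foldl (fun (st : List String × String) label =>
      let out :=
        if PySem.Str.startswith label "I-" &&
           (st.2 == "O" || !(PySem.Str.slice st.2 (some 2) none == PySem.Str.slice label (some 2) none))
        then "B-" ++ PySem.Str.slice label (some 2) none
        else label
      (st.1 ++ [out], out)) (acc, pa)).1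
    = acc ++ List.zipWith fixLabel_alt (po :: pred) pred := by
  induction pred generalizing acc pa po with
  | nil => simp
  | cons l rest ih =>
    simp only [List.foldl_cons, List.zipWith_cons_cons]
    rw [show (if PySem.Str.startswith l "I-" &&
        (pa == "O" || !(PySem.Str.slice pa (some 2) none == PySem.Str.slice l (some 2) none))
     then "B-" ++ PySem.Str.slice l (some 2) none else l) = fixLabel_alt po l from fix_congr pa po l h]
    rw [ih (acc ++ [fixLabel_alt po l]) (fixLabel_alt po l) l (prevRel_fix po l)]
    simp

theorem outer_eq (preds : List (List String)) (acc : List (List String)) :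
    preds.foldl (fun corrected pred =>
      let st := pred.foldl (fun (st : List String × String) label =>
        let out :=
          if PySem.Str.startswith label "I-" &&
             (st.2 == "O" || !(PySem.Str.slice st.2 (some 2) none == PySem.Str.slice label (some 2) none))
          then "B-" ++ PySem.Str.slice label (some 2) none
          else label
        (st.1 ++ [out], out)) (([] : List String), "O")
      corrected ++ [st.1]) acc
    = acc ++ preds.map (fun pred => List.zipWith fixLabel_alt ("O" :: pred) pred) := by
  induction preds generalizing acc with
  | nil => simp
  | cons p rest ih =>
    simp only [List.foldl_cons, List.map_cons]
    rw [ih]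
    rw [inner_eq p [] "O" "O" ⟨Iff.rfl, rfl⟩]
    simp

-- ===== VERDICT (by name: the statement is the Claim_ definition above) =====
theorem correct_iob_labels_spec : Claim_equal_correct_iob_labels := by
  intro predictions _
  unfold Spec_correct_iob_labels correct_iob_labels correct_iob_labels_alt
  exact outer_eq predictions []
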